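-- pv_equiv track=rewrite | github.com/Andyh14/Python-Practice | Homeworks/HW5/hw5_part5.py | find_max_index_after
-- ===== SOURCE A (Python) =====
-- def find_max_index_after(i, some_list):
--     """
--     :param i: start at position i to look for the max
--     :param some_list: the list to search
--     :return: the INDEX of the maximum, not the maximum itself!
--     """
--     greater_index = 0
--     max_number = some_list[i]
--
--     # finds the max number and it's index from index value i to the end.
--     for x in range(i, len(some_list)):
--         if some_list[x] >= max_number:
--             max_number = some_list[x]
--             greater_index = x
--     return greater_index
-- ===== SOURCE B (Python) =====
-- def find_max_index_after(i, some_list):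
--     """
--     :param i: start at position i to look for the max
--     :param some_list: the list to search
--     :return: the INDEX of the maximum, not the maximum itself!
--     """
--     # Pass 1: find the maximum value over positions i .. len-1.
--     m = some_list[i]
--     for x in range(i, len(some_list)):
--         if some_list[x] > m:
--             m = some_list[x]
--     # Pass 2: scan backwards and return the first position holding it
--     # (= the last occurrence, matching the >= update rule of the original).
--     for x in reversed(range(i, len(some_list))):
--         if some_list[x] == m:
--             return x
-- ===== Notes on version B (the rewrite author's own statement) =====
-- stated objective: alternative
-- what changed: Replaces A's single simultaneous value+index tracking loop by two differently-shaped passes: a forward pass computing only the maximum value, then a backward scan returning the first (i.e. last-occurrence) index holding it.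
import Mathlib
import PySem

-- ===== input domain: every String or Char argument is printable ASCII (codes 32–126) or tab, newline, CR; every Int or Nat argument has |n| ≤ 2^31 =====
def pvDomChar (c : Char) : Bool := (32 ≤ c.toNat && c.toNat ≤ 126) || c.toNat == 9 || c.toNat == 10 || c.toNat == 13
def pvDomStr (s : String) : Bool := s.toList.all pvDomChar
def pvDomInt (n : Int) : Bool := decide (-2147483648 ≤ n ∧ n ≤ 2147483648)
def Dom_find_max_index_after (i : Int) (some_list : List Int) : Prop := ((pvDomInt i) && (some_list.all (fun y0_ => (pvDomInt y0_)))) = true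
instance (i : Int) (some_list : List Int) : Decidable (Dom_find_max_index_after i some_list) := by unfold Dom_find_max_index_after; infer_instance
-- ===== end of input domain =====

-- B replaces A's single simultaneous value+index tracking loop by two passes:
-- a forward pass computing only the maximum value, then a backward scan returning
-- the first (= last-occurrence) index holding it. Alternative decomposition, same cost.

-- ===== PORT A =====
def find_max_index_after (i : Int) (some_list : List Int) : Int :=
  -- max_number = some_list[i]; in range under Pre_, so getD 0 is never the raising case there
  let max_number := (PySem.List.pyGet? some_list i).getD 0
  -- for x in range(i, len(some_list)): if some_list[x] >= max_number: update both
  let st := (PySem.List.pyRange i (some_list.length : Int) 1).foldl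
    (fun (s : Int × Int) x =>
      if (PySem.List.pyGet? some_list x).getD 0 ≥ s.2
      then (x, (PySem.List.pyGet? some_list x).getD 0) else s)
    (0, max_number)
  st.1

-- ===== PORT B =====
def find_max_index_after_alt (i : Int) (some_list : List Int) : Int :=
  -- m = some_list[i]; in range under Pre_
  let m0 := (PySem.List.pyGet? some_list i).getD 0
  -- pass 1: for x in range(i, len(some_list)): if some_list[x] > m: m = some_list[x]
  let m := (PySem.List.pyRange i (some_list.length : Int) 1).foldl
    (fun m x => if (PySem.List.pyGet? some_list x).getD 0 > m
                then (PySem.List.pyGet? some_list x).getD 0 else m) m0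
  -- pass 2: for x in reversed(range(i, len(some_list))): if some_list[x] == m: return x
  match (PySem.List.pyRange i (some_list.length : Int) 1).reverse.find?
          (fun x => (PySem.List.pyGet? some_list x).getD 0 == m) with
  | some x => x
  | none => 0    -- unreachable: the maximum is attained in the scanned range

-- ===== PRECONDITION & SPEC =====
-- Pre_ excludes exactly the inputs where some_list[i] raises IndexError in A.
def Pre_find_max_index_after (i : Int) (some_list : List Int) : Prop :=
  -(some_list.length : Int) ≤ i ∧ i < (some_list.length : Int)
instance (i : Int) (some_list : List Int) : Decidable (Pre_find_max_index_after i some_list) := by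
  unfold Pre_find_max_index_after; infer_instance
def pvWitness_find_max_index_after : Int × List Int := (0, [3, 1, 3])

def Spec_find_max_index_after (i : Int) (some_list : List Int) (out : Int) : Prop := out = find_max_index_after_alt i some_list
instance (i : Int) (some_list : List Int) (out : Int) : Decidable (Spec_find_max_index_after i some_list out) := by unfold Spec_find_max_index_after; infer_instance

-- ===== CLAIM (what is proved, stated in full; the proofs are below) =====
def Claim_equal_find_max_index_after : Prop := ∀ (i : Int) (some_list : List Int), Dom_find_max_index_after i some_list → Pre_find_max_index_after i some_list → Spec_find_max_index_after i some_list (find_max_index_after i some_list)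

-- ===== LEMMAS AND PROOFS =====

-- The second component of A's pair fold is B's running maximum.
theorem pv_snd (g : Int → Int) (xs : List Int) (gi m : Int) :
    (xs.foldl (fun s x => if g x ≥ s.2 then (x, g x) else s) (gi, m)).2
      = xs.foldl (fun m x => if g x > m then g x else m) m := by
  induction xs generalizing gi m with
  | nil => rfl
  | cons x xs ih =>
    simp only [List.foldl_cons]
    by_cases h : g x ≥ m
    · rw [if_pos h]
      by_cases h2 : g x > m
      · rw [if_pos h2]; exact ih x (g x)
      · rw [if_neg h2]
        have hxm : g x = m := le_antisymm (not_lt.mp h2) h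
        rw [hxm]; exact ih x m
    · rw [if_neg h, if_neg (by omega : ¬ g x > m)]; exact ih gi m

-- The first component of A's pair fold is the first index, scanning backwards,
-- whose value equals B's maximum (defaulting to the initial index gi).
theorem pv_fst (g : Int → Int) (xs : List Int) (gi m : Int) :
    (xs.foldl (fun s x => if g x ≥ s.2 then (x, g x) else s) (gi, m)).1
      = (xs.reverse.find?
          (fun x => g x == xs.foldl (fun m x => if g x > m then g x else m) m)).getD gi := by
  induction xs using List.reverseRecOn generalizing gi m with
  | nil => rfl
  | append_singleton ys x ih =>
    rw [List.foldl_append, List.foldl_append, List.reverse_append]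
    simp only [List.foldl_cons, List.foldl_nil, List.reverse_cons, List.reverse_nil,
      List.nil_append, List.singleton_append, List.find?_cons]
    have hsnd := pv_snd g ys gi m
    set My := ys.foldl (fun m x => if g x > m then g x else m) m with hMy
    by_cases h : g x ≥ (ys.foldl (fun s x => if g x ≥ s.2 then (x, g x) else s) (gi, m)).2
    · rw [if_pos h]
      rw [hsnd] at h
      have hM : (if g x > My then g x else My) = g x := by
        by_cases h2 : g x > My
        · rw [if_pos h2]
        · rw [if_neg h2]; omega
      rw [hM]
      simp
    · rw [if_neg h]
      rw [hsnd] at h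
      have hM : (if g x > My then g x else My) = My := by
        rw [if_neg (by omega : ¬ g x > My)]
      rw [hM]
      have hpred : (g x == My) = false := by
        simp only [beq_eq_false_iff_ne, ne_eq]; omega
      rw [hpred]
      exact ih gi m

-- ===== VERDICT (by name: the statement is the Claim_ definition above) =====
theorem find_max_index_after_spec : Claim_equal_find_max_index_after := by
  intro i some_list _ _
  unfold Spec_find_max_index_after find_max_index_after find_max_index_after_alt
  rw [pv_fst]
  cases hf : (PySem.List.pyRange i (some_list.length : Int) 1).reverse.find?
      (fun x => (PySem.List.pyGet? some_list x).getD 0 ==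
        (PySem.List.pyRange i (some_list.length : Int) 1).foldl
          (fun m x => if (PySem.List.pyGet? some_list x).getD 0 > m
                      then (PySem.List.pyGet? some_list x).getD 0 else m)
          ((PySem.List.pyGet? some_list i).getD 0)) with
  | none => simp [hf]
  | some x => simp [hf]
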